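-- pv_equiv track=rewrite | github.com/tomboflight/tomboflight | backend/app/services/lineage_proof_service.py | _find_descendant_path
-- ===== SOURCE A (Python) =====
-- from collections import deque
-- from typing import Any, Dict, List, Optional, Set
--
-- def _find_descendant_path(
--     ancestor_id: str,
--     descendant_id: str,
--     parent_to_children: Dict[str, Set[str]],
-- ) -> Optional[List[str]]:
--     if ancestor_id == descendant_id:
--         return [ancestor_id]
--
--     queue = deque([(ancestor_id, [ancestor_id])])
--     visited: Set[str] = set()
--
--     while queue:
--         current_id, path = queue.popleft()
--
--         if current_id in visited:
--             continue
--
--         visited.add(current_id)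
--
--         for child_id in sorted(parent_to_children.get(current_id, set())):
--             if child_id == descendant_id:
--                 return path + [child_id]
--
--             if child_id not in visited:
--                 queue.append((child_id, path + [child_id]))
--
--     return None
-- ===== SOURCE B (Python) =====
-- from collections import deque
--
--
-- def _find_descendant_path(ancestor_id, descendant_id, parent_to_children):
--     # BFS that stores one parent pointer per discovered node instead of copying
--     # the whole path onto every queue entry; the path is rebuilt once at the end.
--     if ancestor_id == descendant_id:
--         return [ancestor_id]
--
--     parent = {}
--     queue = deque([ancestor_id])
--
--     while queue:
--         current = queue.popleft()
--
--         for child in sorted(parent_to_children.get(current, set())):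
--             if child == descendant_id:
--                 path = [child]
--                 node = current
--                 while node != ancestor_id:
--                     path.append(node)
--                     node = parent[node]
--                 path.append(ancestor_id)
--                 path.reverse()
--                 return path
--
--             if child != ancestor_id and child not in parent:
--                 parent[child] = current
--                 queue.append(child)
--
--     return None
-- ===== Notes on version B (the rewrite author's own statement) =====
-- stated objective: alternative
-- what changed: BFS queue entries carry only the node id with a parent-pointer dict built during the search (one insertion per discovered node), and the path is reconstructed once from the pointers when the descendant is found, instead of copying the whole path list onto every queue entry.
import Mathlib
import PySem

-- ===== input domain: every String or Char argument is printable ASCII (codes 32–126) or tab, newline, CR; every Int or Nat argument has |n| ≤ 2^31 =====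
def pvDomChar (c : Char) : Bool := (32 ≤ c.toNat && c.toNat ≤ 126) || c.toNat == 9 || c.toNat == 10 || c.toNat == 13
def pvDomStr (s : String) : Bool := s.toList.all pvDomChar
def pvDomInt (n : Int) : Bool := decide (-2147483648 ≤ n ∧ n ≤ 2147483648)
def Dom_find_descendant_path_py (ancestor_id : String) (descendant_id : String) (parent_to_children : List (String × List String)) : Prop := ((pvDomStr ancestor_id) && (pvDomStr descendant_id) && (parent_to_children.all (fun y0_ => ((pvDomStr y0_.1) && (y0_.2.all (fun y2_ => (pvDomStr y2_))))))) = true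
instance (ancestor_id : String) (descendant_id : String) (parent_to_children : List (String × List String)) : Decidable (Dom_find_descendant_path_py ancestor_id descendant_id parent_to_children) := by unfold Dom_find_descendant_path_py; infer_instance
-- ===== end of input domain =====

-- B replaces A's per-queue-entry path copies by a parent-pointer dict with a single
-- path reconstruction at the end (objective: alternative algorithm, same result).

-- ===== PORT A =====

-- sorted(parent_to_children.get(x, set())) — shared subexpression of both sources
def pvChildren (g : List (String × List String)) (x : String) : List String :=
  PySem.List.sorted ((PySem.Dict.mk g).getD x []) (fun s => s) false

-- the for-loop body of A: early return (Sum.inl) or the list of pairs appended to the queue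
def pvExpandA (desc : String) (visited : PySem.Set String) (path : List String) :
    List String → List (String × List String) → Sum (List String) (List (String × List String))
  | [], acc => Sum.inr acc
  | c :: cs, acc =>
    if c = desc then Sum.inl (path ++ [c])
    else if PySem.Set.contains visited c then pvExpandA desc visited path cs acc
    else pvExpandA desc visited path cs (acc ++ [(c, path ++ [c])])

-- fuel bound on the number of node expansions (1 + total number of child occurrences);
-- the Python while-loop expands each node at most once, so this bound is never reached
def pvFuel (g : List (String × List String)) : Nat :=
  1 + (g.map (fun kv => kv.2.length)).sum

def pvLoopA (desc : String) (g : List (String × List String)) :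
    Nat → List (String × List String) → PySem.Set String → Option (List String)
  | _, [], _ => none
  | fuel, (x, path) :: rest, visited =>
    if PySem.Set.contains visited x then pvLoopA desc g fuel rest visited
    else
      match fuel with
      | 0 => none
      | fuel' + 1 =>
        match pvExpandA desc (PySem.Set.add visited x) path (pvChildren g x) [] with
        | Sum.inl r => some r
        | Sum.inr pushed => pvLoopA desc g fuel' (rest ++ pushed) (PySem.Set.add visited x)
  termination_by fuel queue _ => (fuel, queue.length)

def find_descendant_path_py (ancestor_id : String) (descendant_id : String) (parent_to_children : List (String × List String)) : Option (List String) :=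
  if ancestor_id = descendant_id then some [ancestor_id]
  else pvLoopA descendant_id parent_to_children (pvFuel parent_to_children)
        [(ancestor_id, [ancestor_id])] PySem.Set.empty

-- ===== PORT B =====

-- B's reconstruction loop: walk the parent pointers from `node` up to the ancestor,
-- prepending as we go (the port builds the reversed list directly); fuel ≥ chain length
def pvRebuild (anc : String) (parent : PySem.Dict String String) :
    Nat → String → List String → List String
  | 0, _, acc => acc
  | fuel + 1, node, acc =>
    if node = anc then anc :: acc
    else
      match parent.get? node with
      | none => acc
      | some p => pvRebuild anc parent fuel p (node :: acc)

-- B's for-loop body: early return (Sum.inl) or (updated parent dict, ids appended to queue)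
def pvExpandB (anc desc cur : String) :
    List String → PySem.Dict String String → List String →
      Sum (List String) (PySem.Dict String String × List String)
  | [], parent, qs => Sum.inr (parent, qs)
  | c :: cs, parent, qs =>
    if c = desc then Sum.inl (pvRebuild anc parent (parent.items.length + 1) cur [c])
    else if c ≠ anc ∧ parent.contains c = false then
      pvExpandB anc desc cur cs (parent.insert c cur) (qs ++ [c])
    else pvExpandB anc desc cur cs parent qs

def pvLoopB (anc desc : String) (g : List (String × List String)) :
    Nat → List String → PySem.Dict String String → Option (List String)
  | _, [], _ => none
  | 0, _ :: _, _ => none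
  | fuel + 1, x :: rest, parent =>
    match pvExpandB anc desc x (pvChildren g x) parent [] with
    | Sum.inl r => some r
    | Sum.inr (parent', pushed) => pvLoopB anc desc g fuel (rest ++ pushed) parent'

def find_descendant_path_py_alt (ancestor_id : String) (descendant_id : String) (parent_to_children : List (String × List String)) : Option (List String) :=
  if ancestor_id = descendant_id then some [ancestor_id]
  else pvLoopB ancestor_id descendant_id parent_to_children (pvFuel parent_to_children)
        [ancestor_id] PySem.Dict.empty

-- ===== PRECONDITION & SPEC =====
def Spec_find_descendant_path_py (ancestor_id : String) (descendant_id : String) (parent_to_children : List (String × List String)) (out : Option (List String)) : Prop := out = find_descendant_path_py_alt ancestor_id descendant_id parent_to_children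
instance (ancestor_id : String) (descendant_id : String) (parent_to_children : List (String × List String)) (out : Option (List String)) : Decidable (Spec_find_descendant_path_py ancestor_id descendant_id parent_to_children out) := by unfold Spec_find_descendant_path_py; infer_instance

-- ===== CLAIM (what is proved, stated in full; the proofs are below) =====
def Claim_equal_find_descendant_path_py : Prop := ∀ (ancestor_id : String) (descendant_id : String) (parent_to_children : List (String × List String)), Dom_find_descendant_path_py ancestor_id descendant_id parent_to_children → Spec_find_descendant_path_py ancestor_id descendant_id parent_to_children (find_descendant_path_py ancestor_id descendant_id parent_to_children)

-- ===== LEMMAS AND PROOFS =====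

-- "process the A-queue left to right, keep the first occurrence of each not-yet-visited id"
def pvEdf : List (String × List String) → List String → List (String × List String)
  | [], _ => []
  | (x, p) :: rest, v => if x ∈ v then pvEdf rest v else (x, p) :: pvEdf rest (x :: v)

-- a node already discovered by B: the ancestor or a key of the parent dict
def pvSeen (anc : String) (parent : PySem.Dict String String) (x : String) : Prop :=
  x = anc ∨ parent.contains x = true

-- the parent chain from x reaches the ancestor in exactly n steps
def pvReach (anc : String) (parent : PySem.Dict String String) : Nat → String → Prop
  | 0, x => x = anc
  | n + 1, x => x ≠ anc ∧ ∃ p, parent.get? x = some p ∧ pvReach anc parent n p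

def pvClosed (anc : String) (parent : PySem.Dict String String) : Prop :=
  ∀ k v, parent.get? k = some v → pvSeen anc parent v

-- the full path ancestor → x encoded by the parent pointers
def pvChain (anc : String) (parent : PySem.Dict String String) (x : String) : List String :=
  pvRebuild anc parent (parent.items.length + 1) x []

lemma pvSet_contains_iff (s : PySem.Set String) (x : String) :
    PySem.Set.contains s x = true ↔ x ∈ s := by
  simp [PySem.Set.contains]

lemma pvEdf_congr (l : List (String × List String)) :
    ∀ (v w : List String), (∀ y, y ∈ v ↔ y ∈ w) → pvEdf l v = pvEdf l w := by
  induction l with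
  | nil => intro v w _; rfl
  | cons e t ih =>
    obtain ⟨x, p⟩ := e
    intro v w h
    simp only [pvEdf]
    by_cases hx : x ∈ v
    · rw [if_pos hx, if_pos ((h x).1 hx)]
      exact ih v w h
    · rw [if_neg hx, if_neg (fun hw => hx ((h x).2 hw))]
      exact congrArg (List.cons (x, p))
        (ih (x :: v) (x :: w) (fun y => by simp only [List.mem_cons]; rw [h y]))

lemma pvEdf_append (l1 : List (String × List String)) :
    ∀ (l2 : List (String × List String)) (v : List String),
      pvEdf (l1 ++ l2) v = pvEdf l1 v ++ pvEdf l2 (l1.map Prod.fst ++ v) := by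
  induction l1 with
  | nil => intro l2 v; simp [pvEdf]
  | cons e t ih =>
    obtain ⟨x, p⟩ := e
    intro l2 v
    simp only [List.cons_append, pvEdf, List.map_cons]
    by_cases hx : x ∈ v
    · rw [if_pos hx, if_pos hx, ih]
      congr 1
      apply pvEdf_congr
      intro y
      simp only [List.mem_append, List.mem_cons]
      constructor
      · intro h
        exact Or.inr h
      · rintro (rfl | h)
        · exact Or.inr hx
        · exact h
    · rw [if_neg hx, if_neg hx, ih]
      simp only [List.cons_append]
      congr 2
      apply pvEdf_congr
      intro y
      simp only [List.mem_append, List.mem_cons]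
      tauto

lemma pvEdf_singleton (c : String) (pp : List String) (v : List String) :
    pvEdf [(c, pp)] v = if c ∈ v then [] else [(c, pp)] := by
  by_cases h : c ∈ v
  · simp [pvEdf, h]
  · simp [pvEdf, h]

lemma pvEdf_fst_sub (l : List (String × List String)) :
    ∀ (v : List String) (y : String),
      y ∈ (pvEdf l v).map Prod.fst → y ∈ l.map Prod.fst := by
  induction l with
  | nil => intro v y h; simp [pvEdf] at h
  | cons e t ih =>
    obtain ⟨x, p⟩ := e
    intro v y h
    simp only [pvEdf] at h
    by_cases hx : x ∈ v
    · rw [if_pos hx] at h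
      simp only [List.map_cons, List.mem_cons]
      exact Or.inr (ih v y h)
    · rw [if_neg hx] at h
      simp only [List.map_cons, List.mem_cons] at h ⊢
      rcases h with h | h
      · exact Or.inl h
      · exact Or.inr (ih (x :: v) y h)

lemma pvRebuild_succ (anc : String) (d : PySem.Dict String String) (f : Nat) (node : String)
    (acc : List String) :
    pvRebuild anc d (f + 1) node acc =
      if node = anc then anc :: acc
      else match d.get? node with
        | none => acc
        | some p => pvRebuild anc d f p (node :: acc) := rfl

lemma pvRebuild_anc (anc : String) (d : PySem.Dict String String) (f : Nat) (node : String)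
    (acc : List String) (hx : node = anc) : pvRebuild anc d (f + 1) node acc = anc :: acc := by
  rw [pvRebuild_succ, if_pos hx]

lemma pvRebuild_none (anc : String) (d : PySem.Dict String String) (f : Nat) (node : String)
    (acc : List String) (hx : ¬ node = anc) (h : d.get? node = none) :
    pvRebuild anc d (f + 1) node acc = acc := by
  rw [pvRebuild_succ, if_neg hx, h]

lemma pvRebuild_step (anc : String) (d : PySem.Dict String String) (f : Nat) (node : String)
    (acc : List String) (q : String) (hx : ¬ node = anc) (h : d.get? node = some q) :
    pvRebuild anc d (f + 1) node acc = pvRebuild anc d f q (node :: acc) := by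
  rw [pvRebuild_succ, if_neg hx, h]

lemma pvRebuild_acc (anc : String) (parent : PySem.Dict String String) :
    ∀ (f : Nat) (x : String) (acc : List String),
      pvRebuild anc parent f x acc = pvRebuild anc parent f x [] ++ acc := by
  intro f
  induction f with
  | zero => intro x acc; simp [pvRebuild]
  | succ f ih =>
    intro x acc
    by_cases hx : x = anc
    · rw [pvRebuild_anc anc parent f x acc hx, pvRebuild_anc anc parent f x [] hx]
      simp
    · cases h : parent.get? x with
      | none =>
        rw [pvRebuild_none anc parent f x acc hx h, pvRebuild_none anc parent f x [] hx h]
        simp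
      | some q =>
        rw [pvRebuild_step anc parent f x acc q hx h, pvRebuild_step anc parent f x [] q hx h,
          ih q (x :: acc), ih q [x]]
        simp

lemma pvReach_fuel (anc : String) (parent : PySem.Dict String String) :
    ∀ (n : Nat) (x : String) (f f' : Nat) (acc : List String),
      pvReach anc parent n x → n < f → n < f' →
      pvRebuild anc parent f x acc = pvRebuild anc parent f' x acc := by
  intro n
  induction n with
  | zero =>
    intro x f f' acc h hf hf'
    simp only [pvReach] at h
    cases f with
    | zero => omega
    | succ f => cases f' with
      | zero => omega
      | succ f' => rw [pvRebuild_anc anc parent f x acc h, pvRebuild_anc anc parent f' x acc h]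
  | succ n ih =>
    intro x f f' acc h hf hf'
    simp only [pvReach] at h
    obtain ⟨hx, p, hp, hr⟩ := h
    cases f with
    | zero => omega
    | succ f => cases f' with
      | zero => omega
      | succ f' =>
        rw [pvRebuild_step anc parent f x acc p hx hp,
          pvRebuild_step anc parent f' x acc p hx hp]
        exact ih p f f' (x :: acc) hr (by omega) (by omega)

lemma pvSeen_not_contains (anc : String) (parent : PySem.Dict String String) (c : String)
    (hc : ¬ pvSeen anc parent c) : parent.contains c = false := by
  cases hb : parent.contains c with
  | false => rfl
  | true => exact absurd (Or.inr hb) hc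

lemma pvSeen_mono_insert (anc : String) (parent : PySem.Dict String String) (c w y : String)
    (h : pvSeen anc parent y) : pvSeen anc (parent.insert c w) y := by
  rcases h with h | h
  · exact Or.inl h
  · right
    simp [PySem.Dict.contains_insert, h]

lemma pvSeen_insert_iff (anc : String) (parent : PySem.Dict String String) (c w y : String) :
    pvSeen anc (parent.insert c w) y ↔ y = c ∨ pvSeen anc parent y := by
  unfold pvSeen
  simp only [PySem.Dict.contains_insert, Bool.or_eq_true, beq_iff_eq]
  tauto

lemma pvReach_insert (anc : String) (parent : PySem.Dict String String) (c w : String)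
    (hc : ¬ pvSeen anc parent c) :
    ∀ (n : Nat) (x : String), pvReach anc parent n x → pvReach anc (parent.insert c w) n x := by
  intro n
  induction n with
  | zero => intro x h; exact h
  | succ n ih =>
    intro x h
    simp only [pvReach] at h ⊢
    obtain ⟨hx, p, hp, hr⟩ := h
    have hxc : x ≠ c := by
      rintro rfl
      exact hc (Or.inr (by rw [PySem.Dict.contains_eq_isSome_get?, hp]; rfl))
    refine ⟨hx, p, ?_, ih p hr⟩
    rw [PySem.Dict.get?_insert_of_ne parent w hxc]
    exact hp

lemma pvRebuild_insert (anc : String) (parent : PySem.Dict String String) (c w : String)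
    (hc : ¬ pvSeen anc parent c) :
    ∀ (n : Nat) (x : String) (f : Nat) (acc : List String),
      pvReach anc parent n x → n < f →
      pvRebuild anc (parent.insert c w) f x acc = pvRebuild anc parent f x acc := by
  intro n
  induction n with
  | zero =>
    intro x f acc h hf
    simp only [pvReach] at h
    cases f with
    | zero => omega
    | succ f =>
      rw [pvRebuild_anc anc (parent.insert c w) f x acc h, pvRebuild_anc anc parent f x acc h]
  | succ n ih =>
    intro x f acc h hf
    simp only [pvReach] at h
    obtain ⟨hx, p, hp, hr⟩ := h
    cases f with
    | zero => omega
    | succ f =>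
      have hxc : x ≠ c := by
        rintro rfl
        exact hc (Or.inr (by rw [PySem.Dict.contains_eq_isSome_get?, hp]; rfl))
      rw [pvRebuild_step anc (parent.insert c w) f x acc p hx
          (by rw [PySem.Dict.get?_insert_of_ne parent w hxc]; exact hp),
        pvRebuild_step anc parent f x acc p hx hp]
      exact ih p f (x :: acc) hr (by omega)

lemma pvClosed_insert (anc : String) (parent : PySem.Dict String String) (c w : String)
    (hC : pvClosed anc parent) (hw : pvSeen anc parent w) (hc : ¬ pvSeen anc parent c) :
    pvClosed anc (parent.insert c w) := by
  intro k v h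
  by_cases hk : k = c
  · subst hk
    simp only [PySem.Dict.get?_insert_self] at h
    injection h with hwv
    subst hwv
    exact pvSeen_mono_insert anc parent k w w hw
  · rw [PySem.Dict.get?_insert_of_ne parent w hk] at h
    exact pvSeen_mono_insert anc parent c w v (hC k v h)

lemma pvItems_insert_fresh (parent : PySem.Dict String String) (anc c w : String)
    (hc : ¬ pvSeen anc parent c) :
    (parent.insert c w).items.length = parent.items.length + 1 := by
  have hcf : parent.contains c = false := pvSeen_not_contains anc parent c hc
  simp [PySem.Dict.items_insert_of_not_contains, hcf]

lemma pvChain_insert_stable (anc : String) (parent : PySem.Dict String String) (c w y : String)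
    (hc : ¬ pvSeen anc parent c)
    (hG : ∀ z, pvSeen anc parent z → ∃ n, n ≤ parent.items.length ∧ pvReach anc parent n z)
    (hy : pvSeen anc parent y) :
    pvChain anc (parent.insert c w) y = pvChain anc parent y := by
  obtain ⟨n, hn, hr⟩ := hG y hy
  unfold pvChain
  rw [pvItems_insert_fresh parent anc c w hc]
  rw [pvRebuild_insert anc parent c w hc n y (parent.items.length + 1 + 1) [] hr (by omega)]
  exact pvReach_fuel anc parent n y _ _ [] hr (by omega) (by omega)

lemma pvChain_insert_new (anc : String) (parent : PySem.Dict String String) (c x : String)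
    (hc : ¬ pvSeen anc parent c) (hx : pvSeen anc parent x)
    (hG : ∀ z, pvSeen anc parent z → ∃ n, n ≤ parent.items.length ∧ pvReach anc parent n z) :
    pvChain anc (parent.insert c x) c = pvChain anc parent x ++ [c] := by
  obtain ⟨n, hn, hr⟩ := hG x hx
  have hcanc : ¬ c = anc := fun h => hc (Or.inl h)
  have h1 : pvChain anc (parent.insert c x) c
      = pvRebuild anc (parent.insert c x) (parent.items.length + 1) x [c] := by
    unfold pvChain
    rw [pvItems_insert_fresh parent anc c x hc]
    exact pvRebuild_step anc (parent.insert c x) (parent.items.length + 1) c [] x hcanc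
      (by simp [PySem.Dict.get?_insert_self])
  rw [h1, pvRebuild_insert anc parent c x hc n x _ [c] hr (by omega),
    pvRebuild_acc anc parent _ x [c]]
  rfl

-- the for-loop simulation: A's body and B's body agree step for step
lemma pvExpand_sim (anc desc x : String) (p : List String) (M : List String)
    (vis : PySem.Set String) (hvisM : ∀ y, y ∈ vis → y ∈ M) :
    ∀ (cs : List String) (parent : PySem.Dict String String)
      (accA : List (String × List String)) (qs : List String),
      (∀ y, pvSeen anc parent y ↔ (y ∈ M ∨ y ∈ accA.map Prod.fst)) →
      pvEdf accA M = qs.map (fun y => (y, pvChain anc parent y)) →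
      pvClosed anc parent →
      (∀ z, pvSeen anc parent z → ∃ n, n ≤ parent.items.length ∧ pvReach anc parent n z) →
      pvSeen anc parent x →
      p = pvChain anc parent x →
      (∃ r, pvExpandA desc vis p cs accA = Sum.inl r ∧
            pvExpandB anc desc x cs parent qs = Sum.inl r) ∨
      (∃ accA' parent' qs',
        pvExpandA desc vis p cs accA = Sum.inr accA' ∧
        pvExpandB anc desc x cs parent qs = Sum.inr (parent', qs') ∧
        (∀ y, pvSeen anc parent' y ↔ (y ∈ M ∨ y ∈ accA'.map Prod.fst)) ∧
        pvEdf accA' M = qs'.map (fun y => (y, pvChain anc parent' y)) ∧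
        pvClosed anc parent' ∧
        (∀ z, pvSeen anc parent' z → ∃ n, n ≤ parent'.items.length ∧ pvReach anc parent' n z) ∧
        (∀ y, pvSeen anc parent y → pvSeen anc parent' y) ∧
        (∀ y, pvSeen anc parent y → pvChain anc parent' y = pvChain anc parent y)) := by
  intro cs
  induction cs with
  | nil =>
    intro parent accA qs hseen hacc hC hG hxs hpx
    right
    exact ⟨accA, parent, qs, rfl, rfl, hseen, hacc, hC, hG, fun y h => h, fun y _ => rfl⟩
  | cons c cs ih =>
    intro parent accA qs hseen hacc hC hG hxs hpx
    by_cases hd : c = desc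
    · left
      refine ⟨p ++ [c], ?_, ?_⟩
      · simp only [pvExpandA]
        rw [if_pos hd]
      · simp only [pvExpandB]
        rw [if_pos hd, pvRebuild_acc anc parent (parent.items.length + 1) x [c], hpx]
        rfl
    · by_cases hs : pvSeen anc parent c
      · -- c already discovered by B: B's push condition is false
        have hBskip : ¬ (c ≠ anc ∧ parent.contains c = false) := by
          rintro ⟨h1, h2⟩
          rcases hs with h | h
          · exact h1 h
          · rw [h] at h2; cases h2
        by_cases hcv : PySem.Set.contains vis c = true
        · -- A skips too
          simp only [pvExpandA, pvExpandB]
          rw [if_neg hd, if_pos hcv, if_neg hd, if_neg hBskip]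
          exact ih parent accA qs hseen hacc hC hG hxs hpx
        · -- A pushes a duplicate entry; pvEdf discards it
          simp only [pvExpandA, pvExpandB]
          rw [if_neg hd, if_neg hcv, if_neg hd, if_neg hBskip]
          apply ih parent (accA ++ [(c, p ++ [c])]) qs ?_ ?_ hC hG hxs hpx
          · intro y
            simp only [List.map_append, List.mem_append, List.map_cons, List.map_nil,
              List.mem_cons, List.not_mem_nil, or_false]
            rw [hseen y]
            constructor
            · tauto
            · rintro (h | h | hyc)
              · exact Or.inl h
              · exact Or.inr h
              · rw [hyc]
                exact (hseen c).1 hs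
          · rw [pvEdf_append]
            have hcM : c ∈ accA.map Prod.fst ++ M := by
              rcases (hseen c).1 hs with h | h
              · exact List.mem_append_right _ h
              · exact List.mem_append_left _ h
            rw [pvEdf_singleton, if_pos hcM, List.append_nil]
            exact hacc
      · -- c freshly discovered: both push
        have hcanc : c ≠ anc := fun h => hs (Or.inl h)
        have hcont : parent.contains c = false := pvSeen_not_contains anc parent c hs
        have hcv' : ¬ PySem.Set.contains vis c = true := by
          intro h
          exact hs ((hseen c).2 (Or.inl (hvisM c ((pvSet_contains_iff vis c).1 h))))
        simp only [pvExpandA, pvExpandB]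
        rw [if_neg hd, if_neg hcv', if_neg hd,
          if_pos (show c ≠ anc ∧ parent.contains c = false from ⟨hcanc, hcont⟩)]
        have hqs_sub : ∀ y, y ∈ qs → pvSeen anc parent y := by
          intro y hy
          apply (hseen y).2
          right
          have hfst : (pvEdf accA M).map Prod.fst = qs := by
            rw [hacc, List.map_map]
            simp [Function.comp_def]
          exact pvEdf_fst_sub accA M y (by rw [hfst]; exact hy)
        rcases ih (parent.insert c x) (accA ++ [(c, p ++ [c])]) (qs ++ [c])
          (by
            intro y
            rw [pvSeen_insert_iff]
            simp only [List.map_append, List.mem_append, List.map_cons, List.map_nil,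
              List.mem_cons, List.not_mem_nil, or_false]
            rw [hseen y]
            tauto)
          (by
            rw [pvEdf_append]
            have hcnot : c ∉ accA.map Prod.fst ++ M := by
              intro h
              apply hs
              apply (hseen c).2
              rcases List.mem_append.1 h with h | h
              · exact Or.inr h
              · exact Or.inl h
            rw [pvEdf_singleton, if_neg hcnot, List.map_append]
            congr 1
            · rw [hacc]
              apply List.map_congr_left
              intro y hy
              rw [pvChain_insert_stable anc parent c x y hs hG (hqs_sub y hy)]
            · simp only [List.map_cons, List.map_nil]
              rw [pvChain_insert_new anc parent c x hs hxs hG, ← hpx])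
          (pvClosed_insert anc parent c x hC hxs hs)
          (by
            intro z hz
            rw [pvSeen_insert_iff] at hz
            rcases hz with hzc | hz
            · obtain ⟨n, hn, hr⟩ := hG x hxs
              refine ⟨n + 1, by rw [pvItems_insert_fresh parent anc c x hs]; omega, ?_⟩
              rw [hzc]
              simp only [pvReach]
              refine ⟨hcanc, x, ?_, pvReach_insert anc parent c x hs n x hr⟩
              simp [PySem.Dict.get?_insert_self]
            · obtain ⟨n, hn, hr⟩ := hG z hz
              exact ⟨n, by rw [pvItems_insert_fresh parent anc c x hs]; omega,
                pvReach_insert anc parent c x hs n z hr⟩)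
          (pvSeen_mono_insert anc parent c x x hxs)
          (by
            rw [pvChain_insert_stable anc parent c x x hs hG hxs]
            exact hpx)
          with ⟨r, hA, hB⟩ | ⟨accA', parent', qs', hA, hB, c1, c2, c3, c4, c5, c6⟩
        · exact Or.inl ⟨r, hA, hB⟩
        · right
          refine ⟨accA', parent', qs', hA, hB, c1, c2, c3, c4, ?_, ?_⟩
          · intro y hy
            exact c5 y (pvSeen_mono_insert anc parent c x y hy)
          · intro y hy
            rw [c6 y (pvSeen_mono_insert anc parent c x y hy)]
            exact pvChain_insert_stable anc parent c x y hs hG hy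

lemma pvLoop_sim (anc desc : String) (g : List (String × List String)) :
    ∀ (fuel : Nat) (qa : List (String × List String)) (visited : PySem.Set String)
      (qb : List String) (parent : PySem.Dict String String),
      pvEdf qa visited = qb.map (fun y => (y, pvChain anc parent y)) →
      (∀ y, pvSeen anc parent y ↔ (y ∈ visited ∨ y ∈ qa.map Prod.fst)) →
      (∀ z, pvSeen anc parent z → ∃ n, n ≤ parent.items.length ∧ pvReach anc parent n z) →
      pvClosed anc parent →
      pvLoopA desc g fuel qa visited = pvLoopB anc desc g fuel qb parent := by
  intro fuel
  induction fuel with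
  | zero =>
    intro qa
    induction qa with
    | nil =>
      intro visited qb parent h1 hS hG hC
      have hqb : qb = [] := by
        have h2 : ([] : List (String × List String)) = qb.map (fun y => (y, pvChain anc parent y)) := h1
        cases qb with
        | nil => rfl
        | cons b rb => simp at h2
      subst hqb
      simp [pvLoopA, pvLoopB]
    | cons e rest ih_qa =>
      obtain ⟨x, p⟩ := e
      intro visited qb parent h1 hS hG hC
      by_cases hv : x ∈ visited
      · have hcv : PySem.Set.contains visited x = true := (pvSet_contains_iff _ _).2 hv
        have eqA : pvLoopA desc g 0 ((x, p) :: rest) visited = pvLoopA desc g 0 rest visited := by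
          simp only [pvLoopA]
          rw [if_pos hcv]
        rw [eqA]
        apply ih_qa visited qb parent ?_ ?_ hG hC
        · simpa only [pvEdf, if_pos hv] using h1
        · intro y
          rw [hS y]
          simp only [List.map_cons, List.mem_cons]
          constructor
          · rintro (h | h)
            · exact Or.inl h
            · rcases h with rfl | h
              · exact Or.inl hv
              · exact Or.inr h
          · rintro (h | h)
            · exact Or.inl h
            · exact Or.inr (Or.inr h)
      · have hcv : ¬ PySem.Set.contains visited x = true :=
          fun h => hv ((pvSet_contains_iff _ _).1 h)
        simp only [pvEdf, if_neg hv] at h1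
        cases qb with
        | nil => simp at h1
        | cons b rb =>
          simp only [List.map_cons] at h1
          have eqA : pvLoopA desc g 0 ((x, p) :: rest) visited = none := by
            simp only [pvLoopA]
            rw [if_neg hcv]
          rw [eqA]
          simp [pvLoopB]
  | succ fuel ihf =>
    intro qa
    induction qa with
    | nil =>
      intro visited qb parent h1 hS hG hC
      have hqb : qb = [] := by
        have h2 : ([] : List (String × List String)) = qb.map (fun y => (y, pvChain anc parent y)) := h1
        cases qb with
        | nil => rfl
        | cons b rb => simp at h2
      subst hqb
      simp [pvLoopA, pvLoopB]
    | cons e rest ih_qa =>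
      obtain ⟨x, p⟩ := e
      intro visited qb parent h1 hS hG hC
      by_cases hv : x ∈ visited
      · have hcv : PySem.Set.contains visited x = true := (pvSet_contains_iff _ _).2 hv
        have eqA : pvLoopA desc g (fuel + 1) ((x, p) :: rest) visited
            = pvLoopA desc g (fuel + 1) rest visited := by
          simp only [pvLoopA]
          rw [if_pos hcv]
        rw [eqA]
        apply ih_qa visited qb parent ?_ ?_ hG hC
        · simpa only [pvEdf, if_pos hv] using h1
        · intro y
          rw [hS y]
          simp only [List.map_cons, List.mem_cons]
          constructor
          · rintro (h | h)
            · exact Or.inl h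
            · rcases h with rfl | h
              · exact Or.inl hv
              · exact Or.inr h
          · rintro (h | h)
            · exact Or.inl h
            · exact Or.inr (Or.inr h)
      · -- the head x is expanded by both programs
        have hcv : ¬ PySem.Set.contains visited x = true :=
          fun h => hv ((pvSet_contains_iff _ _).1 h)
        simp only [pvEdf, if_neg hv] at h1
        cases qb with
        | nil => simp at h1
        | cons b rb =>
          simp only [List.map_cons] at h1
          injection h1 with hhead ht
          have hxb : x = b := congrArg Prod.fst hhead
          subst hxb
          have hpb : p = pvChain anc parent x := congrArg Prod.snd hhead
          have eqA : pvLoopA desc g (fuel + 1) ((x, p) :: rest) visited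
              = (match pvExpandA desc (PySem.Set.add visited x) p (pvChildren g x) [] with
                 | Sum.inl r => some r
                 | Sum.inr pushed =>
                     pvLoopA desc g fuel (rest ++ pushed) (PySem.Set.add visited x)) := by
            simp only [pvLoopA]
            rw [if_neg hcv]
          have eqB : pvLoopB anc desc g (fuel + 1) (x :: rb) parent
              = (match pvExpandB anc desc x (pvChildren g x) parent [] with
                 | Sum.inl r => some r
                 | Sum.inr (parent', pushed) =>
                     pvLoopB anc desc g fuel (rb ++ pushed) parent') := by
            simp only [pvLoopB]
          rw [eqA, eqB]
          have hxseen : pvSeen anc parent x :=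
            (hS x).2 (Or.inr (by simp))
          have hrb_sub : ∀ y, y ∈ rb → pvSeen anc parent y := by
            intro y hy
            apply (hS y).2
            right
            have hfst : (pvEdf rest (x :: visited)).map Prod.fst = rb := by
              rw [ht, List.map_map]
              simp [Function.comp_def]
            have : y ∈ (pvEdf rest (x :: visited)).map Prod.fst := by rw [hfst]; exact hy
            simp only [List.map_cons, List.mem_cons]
            exact Or.inr (pvEdf_fst_sub rest (x :: visited) y this)
          rcases pvExpand_sim anc desc x p (rest.map Prod.fst ++ PySem.Set.add visited x)
            (PySem.Set.add visited x) (fun y hy => List.mem_append_right _ hy)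
            (pvChildren g x) parent [] []
            (by
              intro y
              rw [hS y]
              simp only [List.map_cons, List.mem_cons, List.mem_append, List.map_nil,
                List.not_mem_nil, or_false, PySem.Set.mem_add]
              tauto)
            rfl hC hG hxseen hpb
            with ⟨r, hA, hB⟩ | ⟨accA', parent', qs', hA, hB, c1, c2, c3, c4, c5, c6⟩
          · rw [hA, hB]
          · rw [hA, hB]
            apply ihf (rest ++ accA') (PySem.Set.add visited x) (rb ++ qs') parent' ?_ ?_ c4 c3
            · have e1 : pvEdf rest (PySem.Set.add visited x) = pvEdf rest (x :: visited) :=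
                pvEdf_congr rest _ _
                  (fun y => by simp only [PySem.Set.mem_add, List.mem_cons]; tauto)
              have e2 : pvEdf rest (PySem.Set.add visited x)
                  = rb.map (fun y => (y, pvChain anc parent' y)) := by
                rw [e1, ht]
                apply List.map_congr_left
                intro y hy
                rw [c6 y (hrb_sub y hy)]
              rw [pvEdf_append, e2, c2, List.map_append]
            · intro y
              rw [c1 y]
              simp only [List.mem_append, List.map_append]
              tauto


-- ===== VERDICT (by name: the statement is the Claim_ definition above) =====
theorem find_descendant_path_py_spec : Claim_equal_find_descendant_path_py := by
  intro a d g _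
  unfold Spec_find_descendant_path_py find_descendant_path_py find_descendant_path_py_alt
  by_cases had : a = d
  · simp [had]
  · rw [if_neg had, if_neg had]
    apply pvLoop_sim
    · simp [pvEdf, pvChain, pvRebuild, PySem.Set.empty, PySem.Dict.empty]
    · intro y
      simp [pvSeen, PySem.Dict.contains_empty, PySem.Set.empty]
    · intro z hz
      rcases hz with h | h
      · exact ⟨0, Nat.zero_le _, h⟩
      · rw [PySem.Dict.contains_empty] at h
        cases h
    · intro k v h
      rw [PySem.Dict.get?_empty] at h
      cases h
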